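-- pv_equiv track=rewrite | github.com/bugagarep/edu-python | lessons/2025/lesson_6.py | build_caesar_dict
-- ===== SOURCE A (Python) =====
-- def build_caesar_dict(shift):
--     lower = [chr(i) for i in range(ord('a'), ord('z') + 1)]
--     upper = [chr(i) for i in range(ord('A'), ord('Z') + 1)]
--
--     table = {}
--     for i in range(26):
--         table[lower[i]] = lower[(i + shift) % 26]
--         table[upper[i]] = upper[(i + shift) % 26]
--     return table
-- ===== SOURCE B (Python) =====
-- def build_caesar_dict(shift):
--     low = 'abcdefghijklmnopqrstuvwxyz'
--     rot = low[shift % 26:] + low[:shift % 26]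
--     return dict(p for k, v in zip(low, rot)
--                   for p in ((k, v), (k.upper(), v.upper())))
-- ===== Notes on version B (the rewrite author's own statement) =====
-- stated objective: idiomatic
-- what changed: B rotates the lowercase alphabet once with slicing (low[s:]+low[:s] with s = shift mod the alphabet length) and builds the dict from zipped pairs, deriving uppercase via .upper(), instead of A's per-index modular lookups into two precomputed chr() alphabets inside an explicit loop.
import Mathlib
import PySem

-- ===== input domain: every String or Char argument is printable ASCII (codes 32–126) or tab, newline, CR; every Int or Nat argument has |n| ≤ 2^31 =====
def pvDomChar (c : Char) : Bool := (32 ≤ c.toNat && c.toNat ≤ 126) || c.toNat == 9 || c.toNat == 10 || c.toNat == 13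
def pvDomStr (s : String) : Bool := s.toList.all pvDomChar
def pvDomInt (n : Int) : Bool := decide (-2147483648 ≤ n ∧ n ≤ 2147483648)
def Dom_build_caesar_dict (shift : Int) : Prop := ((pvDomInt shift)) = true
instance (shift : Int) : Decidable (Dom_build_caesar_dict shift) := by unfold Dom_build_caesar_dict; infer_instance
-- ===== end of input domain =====

-- B builds the table from one sliced rotation of the alphabet zipped against it (uppercase via upper()),
-- instead of A's per-index (i+shift)%26 lookups into two chr()-built alphabets — idiomatic, same cost.


-- ===== PORT A =====
-- chr(i) is ported by hand as String.ofList [Char.ofNat i.toNat] (exact: i ranges over ASCII 65..122)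
def build_caesar_dict (shift : Int) : List (String × String) :=
  let lower : List String := (PySem.List.pyRange 97 123 1).map (fun i => String.ofList [Char.ofNat i.toNat])
  let upper : List String := (PySem.List.pyRange 65 91 1).map (fun i => String.ofList [Char.ofNat i.toNat])
  let table : PySem.Dict String String :=
    (PySem.List.pyRange 0 26 1).foldl (fun t i =>
      (t.insert (PySem.List.pyGetD lower i "") (PySem.List.pyGetD lower (PySem.Int.mod (i + shift) 26) "")).insert
        (PySem.List.pyGetD upper i "") (PySem.List.pyGetD upper (PySem.Int.mod (i + shift) 26) ""))
      PySem.Dict.empty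
  table.items

-- ===== PORT B =====
-- k.upper() on a one-char string is ported as PySem.Chars.upperChar on the char (exact on ASCII)
def build_caesar_dict_alt (shift : Int) : List (String × String) :=
  let low := "abcdefghijklmnopqrstuvwxyz".toList
  let rot := PySem.List.slice low (some (PySem.Int.mod shift 26)) none
              ++ PySem.List.slice low none (some (PySem.Int.mod shift 26))
  ((low.zip rot).flatMap (fun kv =>
    [(String.ofList [kv.1], String.ofList [kv.2]),
     (String.ofList [PySem.Chars.upperChar kv.1], String.ofList [PySem.Chars.upperChar kv.2])])
   |> PySem.Dict.ofList).items

-- ===== PRECONDITION & SPEC =====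
def Spec_build_caesar_dict (shift : Int) (out : List (String × String)) : Prop := out = build_caesar_dict_alt shift
instance (shift : Int) (out : List (String × String)) : Decidable (Spec_build_caesar_dict shift out) := by unfold Spec_build_caesar_dict; infer_instance

-- ===== CLAIM (what is proved, stated in full; the proofs are below) =====
def Claim_equal_build_caesar_dict : Prop := ∀ (shift : Int), Dom_build_caesar_dict shift → Spec_build_caesar_dict shift (build_caesar_dict shift)

-- ===== LEMMAS AND PROOFS =====

-- A's result depends on shift only through shift % 26
lemma build_caesar_dict_mod (shift : Int) :
    build_caesar_dict shift = build_caesar_dict (PySem.Int.mod shift 26) := by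
  have h : ∀ i : Int, PySem.Int.mod (i + shift) 26 = PySem.Int.mod (i + PySem.Int.mod shift 26) 26 := by
    intro i
    rw [PySem.Int.mod_eq_emod_of_pos (a := i + shift) (by norm_num),
        PySem.Int.mod_eq_emod_of_pos (a := shift) (by norm_num),
        PySem.Int.mod_eq_emod_of_pos (a := i + shift % 26) (by norm_num)]
    conv_lhs => rw [Int.add_emod]
    conv_rhs => rw [Int.add_emod, Int.emod_emod_of_dvd _ dvd_rfl]
  unfold build_caesar_dict
  simp only [h]

-- B's result depends on shift only through shift % 26
lemma build_caesar_dict_alt_mod (shift : Int) :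
    build_caesar_dict_alt shift = build_caesar_dict_alt (PySem.Int.mod shift 26) := by
  have h : PySem.Int.mod (PySem.Int.mod shift 26) 26 = PySem.Int.mod shift 26 := by
    rw [PySem.Int.mod_eq_emod_of_pos (a := shift) (by norm_num),
        PySem.Int.mod_eq_emod_of_pos (a := shift % 26) (by norm_num),
        Int.emod_emod_of_dvd _ dvd_rfl]
  unfold build_caesar_dict_alt
  rw [h]

-- the 26 residues, checked by evaluation
set_option maxRecDepth 100000 in
set_option maxHeartbeats 2000000 in
lemma build_caesar_dict_residues :
    ∀ s ∈ PySem.List.pyRange 0 26 1, build_caesar_dict s = build_caesar_dict_alt s := by decide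

-- ===== VERDICT (by name: the statement is the Claim_ definition above) =====
theorem build_caesar_dict_spec : Claim_equal_build_caesar_dict := by
  intro shift _
  unfold Spec_build_caesar_dict
  rw [build_caesar_dict_mod shift, build_caesar_dict_alt_mod shift]
  apply build_caesar_dict_residues
  have h0 := PySem.Int.mod_nonneg shift (b := 26) (by norm_num)
  have h1 := PySem.Int.mod_lt shift (b := 26) (by norm_num)
  simp [PySem.List.mem_pyRange_one]
  omega
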